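-- pv_equiv track=rewrite | github.com/daniel-ziorli/indicators | indicators.py | find_turningpoints
-- ===== SOURCE A (Python) =====
-- def find_turningpoints(opens, closes=5, window=5):
--     out = []
--     if isinstance(closes, int):
--         window = closes
--         closes = opens
--
--     for i in range(window, len(opens) - 1):
--         open_subset = opens[i - window: i]
--         close_subset = closes[i - window: i]
--
--         upper_subset = []
--         lower_subset = []
--         subset = []
--         mid = window // 2
--
--         for j in range(len(close_subset)):
--             if open_subset[j] > close_subset[j]:
--                 upper_subset.append(open_subset[j])
--                 lower_subset.append(close_subset[j])
--             else:
--                 upper_subset.append(close_subset[j])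
--                 lower_subset.append(open_subset[j])
--             subset.append(open_subset[j])
--             subset.append(close_subset[j])
--
--         if upper_subset[mid] == max(subset):
--             out.append([i - mid - 1, upper_subset[mid]])
--         elif lower_subset[mid] == min(subset):
--             out.append([i - mid - 1, lower_subset[mid]])
--
--     return out
-- ===== SOURCE B (Python) =====
-- def find_turningpoints(opens, closes=5, window=5):
--     if isinstance(closes, int):
--         window = closes
--         closes = opens
--     n = len(opens)
--     out = []
--     count = n - 1 - window
--     if count <= 0:
--         return out
--     hi = [max(o, c) for o, c in zip(opens, closes)]
--     lo = [min(o, c) for o, c in zip(opens, closes)]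
--     mid = window // 2
--     maxs = _window_ext(hi, window, count, True)
--     mins = _window_ext(lo, window, count, False)
--     for t in range(count):
--         u = hi[t + mid]
--         l = lo[t + mid]
--         if u == maxs[t]:
--             out.append([t + window - mid - 1, u])
--         elif l == mins[t]:
--             out.append([t + window - mid - 1, l])
--     return out
--
--
-- def _window_ext(xs, w, count, is_max):
--     # sliding-window extremum (max if is_max else min) of xs[t:t+w] for t in range(count),
--     # via a monotonic index deque stored as (dq, head pointer h)
--     res = []
--     dq = []
--     h = 0
--     for i in range(count + w - 1):
--         v = xs[i]
--         while len(dq) > h and ((xs[dq[-1]] <= v) if is_max else (v <= xs[dq[-1]])):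
--             dq.pop()
--         dq.append(i)
--         if i >= w - 1:
--             if dq[h] < i - w + 1:
--                 h += 1
--             res.append(xs[dq[h]])
--     return res
-- ===== Notes on version B (the rewrite author's own statement) =====
-- stated objective: faster
-- what changed: Replaces per-window list building plus full max/min rescans with precomputed pointwise hi/lo arrays and O(n) monotonic-deque sliding-window max/min.
-- outside the precondition, e.g. on find_turningpoints([0, 0, 9, 0, 0, 0], [0, 0, 0], 3): A returns [[1, 0], [2, 9]], B raises IndexError
import Mathlib
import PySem

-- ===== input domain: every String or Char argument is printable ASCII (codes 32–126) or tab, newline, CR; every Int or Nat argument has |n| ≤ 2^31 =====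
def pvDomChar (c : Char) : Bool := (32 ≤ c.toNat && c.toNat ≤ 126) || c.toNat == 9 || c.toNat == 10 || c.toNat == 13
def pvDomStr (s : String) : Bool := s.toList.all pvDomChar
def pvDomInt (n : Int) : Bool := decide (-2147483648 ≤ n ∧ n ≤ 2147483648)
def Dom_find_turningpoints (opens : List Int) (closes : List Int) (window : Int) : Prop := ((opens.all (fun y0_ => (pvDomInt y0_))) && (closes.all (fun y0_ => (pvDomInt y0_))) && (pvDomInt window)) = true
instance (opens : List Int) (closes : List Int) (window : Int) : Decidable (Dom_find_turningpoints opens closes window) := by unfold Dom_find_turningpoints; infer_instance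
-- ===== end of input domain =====

-- B replaces A's per-window list building and max/min rescans (O(n*window)) by pointwise
-- hi/lo arrays and monotonic-deque sliding-window extrema; return values agree on Pre_.

-- ===== PORT A =====
-- closes : List Int here, so Python's 'isinstance(closes, int)' branch never fires;
-- upper_subset[mid] / max(subset) / min(subset) raise on inputs outside Pre_, '.getD 0' stands for those raising states
def find_turningpoints (opens : List Int) (closes : List Int) (window : Int) : List (List Int) :=
  (PySem.List.pyRange window ((opens.length : Int) - 1) 1).foldl (fun out i =>
    let open_subset := PySem.List.slice opens (some (i - window)) (some i)
    let close_subset := PySem.List.slice closes (some (i - window)) (some i)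
    let mid := PySem.Int.floordiv window 2
    let uls := (List.range close_subset.length).foldl
      (fun (acc : List Int × List Int × List Int) (j : Nat) =>
        let oj := (PySem.List.pyGet? open_subset (j : Int)).getD 0
        let cj := (PySem.List.pyGet? close_subset (j : Int)).getD 0
        let ul := if cj < oj then (acc.1 ++ [oj], acc.2.1 ++ [cj])
                  else (acc.1 ++ [cj], acc.2.1 ++ [oj])
        (ul.1, ul.2, acc.2.2 ++ [oj, cj]))
      ([], [], [])
    let um := (PySem.List.pyGet? uls.1 mid).getD 0
    let lm := (PySem.List.pyGet? uls.2.1 mid).getD 0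
    if um = (PySem.List.max? uls.2.2 (fun y => y)).getD 0 then out ++ [[i - mid - 1, um]]
    else if lm = (PySem.List.min? uls.2.2 (fun y => y)).getD 0 then out ++ [[i - mid - 1, lm]]
    else out) []

-- ===== PORT B =====
def pvPleb (isMax : Bool) (a v : Int) : Bool :=
  if isMax then decide (a ≤ v) else decide (v ≤ a)

def pvPopLoop (xs : List Int) (v : Int) (isMax : Bool) (h : Nat) (dq : List Int) : List Int :=
  if hc : h < dq.length ∧ pvPleb isMax ((PySem.List.pyGet? xs ((PySem.List.pyGet? dq (-1)).getD 0)).getD 0) v then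
    pvPopLoop xs v isMax h dq.dropLast
  else dq
termination_by dq.length
decreasing_by
  have hne : dq ≠ [] := by rintro rfl; simp at hc
  simpa [List.length_dropLast] using Nat.sub_lt (List.length_pos_of_ne_nil hne) one_pos

def pvStep (xs : List Int) (w : Int) (isMax : Bool) (st : List Int × List Int × Nat) (i : Int) :
    List Int × List Int × Nat :=
  let v := (PySem.List.pyGet? xs i).getD 0
  let dq := pvPopLoop xs v isMax st.2.2 st.2.1
  let dq := dq ++ [i]
  if w - 1 ≤ i then
    let h := if (PySem.List.pyGet? dq (st.2.2 : Int)).getD 0 < i - w + 1 then st.2.2 + 1 else st.2.2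
    (st.1 ++ [(PySem.List.pyGet? xs ((PySem.List.pyGet? dq (h : Int)).getD 0)).getD 0], dq, h)
  else (st.1, dq, st.2.2)

def pvWindowExt (xs : List Int) (w : Int) (count : Int) (isMax : Bool) : List Int :=
  ((PySem.List.pyRange 0 (count + w - 1) 1).foldl (pvStep xs w isMax) ([], [], 0)).1

def find_turningpoints_alt (opens : List Int) (closes : List Int) (window : Int) : List (List Int) :=
  let n : Int := (opens.length : Int)
  let count := n - 1 - window
  if count ≤ 0 then []
  else
    let hi := (List.zip opens closes).map (fun p => max p.1 p.2)
    let lo := (List.zip opens closes).map (fun p => min p.1 p.2)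
    let mid := PySem.Int.floordiv window 2
    let maxs := pvWindowExt hi window count true
    let mins := pvWindowExt lo window count false
    (PySem.List.pyRange 0 count 1).foldl (fun out t =>
      let u := (PySem.List.pyGet? hi (t + mid)).getD 0
      let l := (PySem.List.pyGet? lo (t + mid)).getD 0
      if u = (PySem.List.pyGet? maxs t).getD 0 then out ++ [[t + window - mid - 1, u]]
      else if l = (PySem.List.pyGet? mins t).getD 0 then out ++ [[t + window - mid - 1, l]]
      else out) []

-- ===== PRECONDITION & SPEC =====
-- Pre_ excludes inputs where A raises (window < 1 with a nonempty loop: upper_subset[mid]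
-- IndexError) and inputs with len(closes) < len(opens) - 2, where A reads silently truncated
-- close windows (it raises, or returns a value computed from a shorter window) while B raises.
def Pre_find_turningpoints (opens : List Int) (closes : List Int) (window : Int) : Prop :=
  (1 ≤ window ∧ (opens.length : Int) ≤ (closes.length : Int) + 2) ∨ (opens.length : Int) ≤ window + 1
instance (opens : List Int) (closes : List Int) (window : Int) : Decidable (Pre_find_turningpoints opens closes window) := by unfold Pre_find_turningpoints; infer_instance

def pvWitness_find_turningpoints : List Int × List Int × Int := ([1, 9, 1, 2, 3, 0, 4], [0, 8, 2, 2, 2, 1, 4], 3)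

def Spec_find_turningpoints (opens : List Int) (closes : List Int) (window : Int) (out : List (List Int)) : Prop := out = find_turningpoints_alt opens closes window
instance (opens : List Int) (closes : List Int) (window : Int) (out : List (List Int)) : Decidable (Spec_find_turningpoints opens closes window out) := by unfold Spec_find_turningpoints; infer_instance

-- ===== CLAIM (what is proved, stated in full; the proofs are below) =====
def Claim_equal_find_turningpoints : Prop := ∀ (opens : List Int) (closes : List Int) (window : Int), Dom_find_turningpoints opens closes window → Pre_find_turningpoints opens closes window → Spec_find_turningpoints opens closes window (find_turningpoints opens closes window)

-- ===== LEMMAS AND PROOFS =====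

-- order facts
theorem pvPleb_refl (m : Bool) (a : Int) : pvPleb m a a = true := by
  cases m <;> simp [pvPleb]

theorem pvPleb_trans (m : Bool) {a b c : Int} (h1 : pvPleb m a b = true) (h2 : pvPleb m b c = true) :
    pvPleb m a c = true := by
  cases m <;> simp_all [pvPleb] <;> omega

theorem pvPleb_antisymm (m : Bool) {a b : Int} (h1 : pvPleb m a b = true) (h2 : pvPleb m b a = true) :
    a = b := by
  cases m <;> simp_all [pvPleb] <;> omega

theorem pvPleb_not (m : Bool) {a b : Int} (h : ¬ pvPleb m a b = true) : pvPleb m b a = true := by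
  cases m <;> simp_all [pvPleb] <;> omega

-- spec objects
def pvSliceExt (m : Bool) (xs : List Int) (t W : Nat) : Int :=
  match (xs.drop t).take W with
  | [] => 0
  | x :: r => r.foldl (fun a b => if m then max a b else min a b) x

def pvSurv (m : Bool) (xs : List Int) (k j : Nat) : Bool :=
  decide (∀ i2 < k, j < i2 → pvPleb m (xs.getD j 0) (xs.getD i2 0) = false)

def pvAct (m : Bool) (xs : List Int) (W k : Nat) : List Nat :=
  (List.range' (k - W) (min W k)).filter (pvSurv m xs k)

def pvEmit (m : Bool) (xs : List Int) (W k : Nat) : List Int :=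
  (List.range (k - (W - 1))).map (fun t => pvSliceExt m xs t W)

def pvIdx (j : Nat) : Int := (j : Int)

def pvInv (m : Bool) (xs : List Int) (W k : Nat) (st : List Int × List Int × Nat) : Prop :=
  ∃ pre : List Int, st.2.1 = pre ++ (pvAct m xs W k).map pvIdx ∧
    pre.length = st.2.2 ∧ st.1 = pvEmit m xs W k

theorem pvPopLoop_spec (xs : List Int) (v : Int) (m : Bool) (pre act : List Int)
    (hmono : act.Pairwise (fun a b =>
      pvPleb m ((PySem.List.pyGet? xs a).getD 0) v = true →
      pvPleb m ((PySem.List.pyGet? xs b).getD 0) v = true)) :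
    pvPopLoop xs v m pre.length (pre ++ act) =
      pre ++ act.filter (fun d => !(pvPleb m ((PySem.List.pyGet? xs d).getD 0) v)) := by
  induction act using List.reverseRecOn with
  | nil =>
      rw [pvPopLoop]
      simp
  | append_singleton as a ih =>
      have hlast : PySem.List.pyGet? (pre ++ (as ++ [a])) (-1) = some a := by
        rw [← List.append_assoc]
        exact PySem.List.pyGet?_neg_one_append_singleton _ _
      have hmono' : as.Pairwise (fun a b =>
          pvPleb m ((PySem.List.pyGet? xs a).getD 0) v = true →
          pvPleb m ((PySem.List.pyGet? xs b).getD 0) v = true) :=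
        hmono.sublist (by simp)
      have hpa : ∀ x ∈ as, pvPleb m ((PySem.List.pyGet? xs x).getD 0) v = true →
          pvPleb m ((PySem.List.pyGet? xs a).getD 0) v = true := by
        have := List.pairwise_append.mp hmono
        intro x hx
        exact this.2.2 x hx a (by simp)
      by_cases hc : pvPleb m ((PySem.List.pyGet? xs a).getD 0) v = true
      · rw [pvPopLoop]
        rw [dif_pos]
        · have hdl : (pre ++ (as ++ [a])).dropLast = pre ++ as := by
            rw [← List.append_assoc, List.dropLast_concat]
          rw [hdl, ih hmono']
          have : (as ++ [a]).filter (fun d => !(pvPleb m ((PySem.List.pyGet? xs d).getD 0) v)) =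
              as.filter (fun d => !(pvPleb m ((PySem.List.pyGet? xs d).getD 0) v)) := by
            simp [List.filter_append, hc]
          rw [this]
        · refine ⟨by simp, ?_⟩
          rw [hlast]; simpa using hc
      · rw [pvPopLoop]
        rw [dif_neg]
        · have : (as ++ [a]).filter (fun d => !(pvPleb m ((PySem.List.pyGet? xs d).getD 0) v)) =
              as ++ [a] := by
            rw [List.filter_eq_self]
            intro x hx
            rcases List.mem_append.mp hx with hx | hx
            · simp only [Bool.not_eq_true']
              by_contra hne
              exact hc (hpa x hx (by revert hne; simp))
            · simp only [List.mem_singleton] at hx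
              subst hx
              simpa using hc
          rw [this]
        · rw [hlast]
          rintro ⟨-, hbad⟩
          exact hc (by simpa using hbad)

theorem pvSurv_succ (m : Bool) (xs : List Int) (k j : Nat) (hj : j < k) :
    pvSurv m xs (k + 1) j = (pvSurv m xs k j && !(pvPleb m (xs.getD j 0) (xs.getD k 0))) := by
  rw [Bool.eq_iff_iff]
  simp only [pvSurv, Bool.and_eq_true, Bool.not_eq_true', decide_eq_true_eq, ← Bool.not_eq_true]
  constructor
  · intro h
    exact ⟨fun i2 h1 h2 => h i2 (by omega) h2, h k (by omega) hj⟩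
  · rintro ⟨h1, h2⟩ i2 hi2 hji
    rcases Nat.lt_succ_iff_lt_or_eq.mp hi2 with h | h
    · exact h1 i2 h hji
    · subst h; exact h2

theorem pvSurv_self (m : Bool) (xs : List Int) (k j : Nat) (h : k ≤ j + 1) : pvSurv m xs k j = true := by
  simp only [pvSurv, decide_eq_true_eq]
  intro i2 h1 h2; omega

theorem pvAct_succ (m : Bool) (xs : List Int) (W k : Nat) :
    (List.range' (k - W) (min W k + 1)).filter (pvSurv m xs (k + 1)) =
      (pvAct m xs W k).filter (fun j => !(pvPleb m (xs.getD j 0) (xs.getD k 0))) ++ [k] := by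
  have hsum : k - W + min W k = k := by omega
  have hsplit : List.range' (k - W) (min W k + 1) = List.range' (k - W) (min W k) ++ [k] := by
    rw [List.range'_concat]
    simp [hsum]
  rw [hsplit, List.filter_append]
  congr 1
  · rw [pvAct, List.filter_filter]
    apply List.filter_congr
    intro j hj
    have hjk : j < k := by
      have := List.mem_range'_1.mp hj
      omega
    rw [pvSurv_succ m xs k j hjk, Bool.and_comm]
  · simp [pvSurv_self m xs (k + 1) k (by omega)]

-- membership facts about pvAct
theorem pvAct_mem {m : Bool} {xs : List Int} {W k j : Nat} (h : j ∈ pvAct m xs W k) :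
    k - W ≤ j ∧ j < k ∧ pvSurv m xs k j = true := by
  rw [pvAct, List.mem_filter] at h
  have := List.mem_range'_1.mp h.1
  exact ⟨this.1, by omega, h.2⟩

theorem pvAct_pairwise (m : Bool) (xs : List Int) (W k : Nat) :
    (pvAct m xs W k).Pairwise (· < ·) :=
  (List.pairwise_lt_range' ..).sublist List.filter_sublist

theorem pvSurv_not_pleb {m : Bool} {xs : List Int} {k a b : Nat}
    (hs : pvSurv m xs k a = true) (hab : a < b) (hbk : b < k) :
    pvPleb m (xs.getD b 0) (xs.getD a 0) = true := by
  simp only [pvSurv, decide_eq_true_eq] at hs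
  apply pvPleb_not m
  rw [hs b hbk hab]
  simp

-- the climb lemma
theorem pvClimb (m : Bool) (xs : List Int) (k : Nat) :
    ∀ d j, j ≤ k → k - j ≤ d → ∃ j', j ≤ j' ∧ j' ≤ k ∧ pvSurv m xs (k + 1) j' = true ∧
      pvPleb m (xs.getD j 0) (xs.getD j' 0) = true := by
  intro d
  induction d with
  | zero =>
      intro j hj hd
      have hjk : j = k := by omega
      exact ⟨j, le_refl _, hj, pvSurv_self m xs (k+1) j (by omega), pvPleb_refl m _⟩
  | succ d ih =>
      intro j hj hd
      by_cases hs : pvSurv m xs (k + 1) j = true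
      · exact ⟨j, le_refl _, hj, hs, pvPleb_refl m _⟩
      · simp only [pvSurv, decide_eq_true_eq] at hs
        push_neg at hs
        obtain ⟨i2, hi2k, hji2, hple⟩ := hs
        simp only [ne_eq, Bool.not_eq_false] at hple
        have hi2k' : i2 ≤ k := by omega
        obtain ⟨j', h1, h2, h3, h4⟩ := ih i2 hi2k' (by omega)
        exact ⟨j', by omega, h2, h3, pvPleb_trans m hple h4⟩

-- slice membership
theorem pvSlice_mem {xs : List Int} {t W : Nat} (hlen : t + W ≤ xs.length) {y : Int} :
    y ∈ (xs.drop t).take W ↔ ∃ j, t ≤ j ∧ j < t + W ∧ y = xs.getD j 0 := by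
  have hlt : ((xs.drop t).take W).length = W := by
    simp [List.length_take, List.length_drop]; omega
  constructor
  · intro hy
    obtain ⟨r, hr, hget⟩ := List.mem_iff_getElem.mp hy
    refine ⟨t + r, by omega, by omega, ?_⟩
    rw [hlt] at hr
    rw [← hget]
    rw [List.getElem_take, List.getElem_drop]
    rw [List.getD_eq_getElem?_getD, List.getElem?_eq_getElem (by omega)]
    rfl
  · rintro ⟨j, h1, h2, rfl⟩
    rw [List.mem_iff_getElem]
    refine ⟨j - t, by omega, ?_⟩
    rw [List.getElem_take, List.getElem_drop]
    rw [List.getD_eq_getElem?_getD, List.getElem?_eq_getElem (by omega)]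
    have : t + (j - t) = j := by omega
    simp [this]

-- pvSliceExt is the extremum
theorem pvSliceExt_ext (m : Bool) (xs : List Int) (t W : Nat) (hW : 1 ≤ W)
    (hlen : t + W ≤ xs.length) :
    pvSliceExt m xs t W ∈ (xs.drop t).take W ∧
      ∀ y ∈ (xs.drop t).take W, pvPleb m y (pvSliceExt m xs t W) = true := by
  have hlt : ((xs.drop t).take W).length = W := by
    simp [List.length_take, List.length_drop]; omega
  rcases hsl : (xs.drop t).take W with _ | ⟨x, r⟩
  · rw [hsl] at hlt; simp at hlt; omega
  · rw [pvSliceExt, hsl]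
    dsimp only
    cases m
    · -- min
      have hfold : r.foldl (fun a b => if false = true then max a b else min a b) x = r.foldl min x := by
        simp
      rw [hfold]
      constructor
      · rcases PySem.List.foldl_min_mem r x with h | h
        · rw [h]; exact List.mem_cons_self
        · exact List.mem_cons_of_mem _ h
      · intro y hy
        rcases List.mem_cons.mp hy with rfl | hy
        · simpa [pvPleb] using (PySem.List.foldl_min_le r y).1
        · simpa [pvPleb] using (PySem.List.foldl_min_le r x).2 y hy
    · -- max
      have hfold : r.foldl (fun a b => if true = true then max a b else min a b) x = r.foldl max x := by
        simp
      rw [hfold]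
      constructor
      · rcases PySem.List.foldl_max_mem r x with h | h
        · rw [h]; exact List.mem_cons_self
        · exact List.mem_cons_of_mem _ h
      · intro y hy
        rcases List.mem_cons.mp hy with rfl | hy
        · simpa [pvPleb] using (PySem.List.le_foldl_max r y).1
        · simpa [pvPleb] using (PySem.List.le_foldl_max r x).2 y hy

-- head of the active deque carries the window extremum
theorem pvHead_ext (m : Bool) (xs : List Int) (W k : Nat) (hW : 1 ≤ W) (hWk : W - 1 ≤ k)
    (hk : k < xs.length) (b : Nat) (brest : List Nat)
    (hA : pvAct m xs W (k + 1) = b :: brest) :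
    xs.getD b 0 = pvSliceExt m xs (k + 1 - W) W := by
  set t := k + 1 - W with ht
  have hlen : t + W ≤ xs.length := by omega
  have hb : t ≤ b ∧ b < k + 1 ∧ pvSurv m xs (k + 1) b = true := by
    have := pvAct_mem (m := m) (xs := xs) (W := W) (k := k + 1) (j := b) (by rw [hA]; simp)
    exact ⟨by omega, this.2.1, this.2.2⟩
  -- b dominates the window
  have hdom : ∀ j, t ≤ j → j ≤ k → pvPleb m (xs.getD j 0) (xs.getD b 0) = true := by
    intro j h1 h2
    obtain ⟨j', hjj', hj'k, hsurv, hple⟩ := pvClimb m xs k (k - j) j h2 (le_refl _)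
    have hj'A : j' ∈ pvAct m xs W (k + 1) := by
      rw [pvAct, List.mem_filter]
      refine ⟨List.mem_range'_1.mpr ⟨by omega, by omega⟩, hsurv⟩
    rw [hA] at hj'A
    rcases List.mem_cons.mp hj'A with rfl | hj'rest
    · exact hple
    · have hbj' : b < j' := by
        have hp := pvAct_pairwise m xs W (k + 1)
        rw [hA] at hp
        exact (List.pairwise_cons.mp hp).1 j' hj'rest
      have : pvPleb m (xs.getD j' 0) (xs.getD b 0) = true :=
        pvSurv_not_pleb hb.2.2 hbj' (by
          have := pvAct_mem (m := m) (xs := xs) (W := W) (k := k + 1) (j := j')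
            (by rw [hA]; exact List.mem_cons_of_mem _ hj'rest)
          omega)
      exact pvPleb_trans m hple this
  -- both are extremal over the same slice
  obtain ⟨hmem, hext⟩ := pvSliceExt_ext m xs t W hW hlen
  have hbmem : xs.getD b 0 ∈ (xs.drop t).take W :=
    (pvSlice_mem hlen).mpr ⟨b, hb.1, by omega, rfl⟩
  have h1 : pvPleb m (xs.getD b 0) (pvSliceExt m xs t W) = true := hext _ hbmem
  have h2 : pvPleb m (pvSliceExt m xs t W) (xs.getD b 0) = true := by
    obtain ⟨j, hj1, hj2, hj3⟩ := (pvSlice_mem hlen).mp hmem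
    rw [hj3]
    exact hdom j hj1 (by omega)
  exact pvPleb_antisymm m h1 h2

theorem pvGetD_nat (xs : List Int) (j : Nat) :
    (PySem.List.pyGet? xs (j : Int)).getD 0 = xs.getD j 0 := by
  rw [PySem.List.pyGet?_natCast, List.getD_eq_getElem?_getD]

theorem pvInv_fold (m : Bool) (xs : List Int) (W : Nat) (hW : 1 ≤ W) :
    ∀ k, k ≤ xs.length →
      pvInv m xs W k (((List.range k).map pvIdx).foldl (pvStep xs (W : Int) m) ([], [], 0)) := by
  intro k
  induction k with
  | zero =>
      intro _
      refine ⟨[], ?_, rfl, ?_⟩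
      · simp [pvAct]
      · simp [pvEmit]
  | succ k ih =>
      intro hk1
      have hk : k < xs.length := by omega
      obtain ⟨pre, hdq, hpre, hres⟩ := ih (by omega)
      rcases hS : ((List.range k).map pvIdx).foldl (pvStep xs (W : Int) m) ([], [], 0) with ⟨res, dq, h⟩
      rw [hS] at hdq hpre hres
      simp only at hdq hpre hres
      have hstep : ((List.range (k+1)).map pvIdx).foldl (pvStep xs (W : Int) m) ([], [], 0)
          = pvStep xs (W : Int) m (res, dq, h) (pvIdx k) := by
        rw [List.range_succ, List.map_append, List.foldl_append, hS]
        rfl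
      rw [hstep]
      -- the processed value
      have hv : (PySem.List.pyGet? xs (pvIdx k)).getD 0 = xs.getD k 0 := pvGetD_nat xs k
      -- the pop loop
      have hmono : ((pvAct m xs W k).map pvIdx).Pairwise (fun a b =>
          pvPleb m ((PySem.List.pyGet? xs a).getD 0) (xs.getD k 0) = true →
          pvPleb m ((PySem.List.pyGet? xs b).getD 0) (xs.getD k 0) = true) := by
        rw [List.pairwise_map]
        have hpw := (List.Pairwise.and_mem).mp (pvAct_pairwise m xs W k)
        refine hpw.imp ?_
        rintro a b ⟨ha, hb, hab⟩ hplea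
        rw [pvIdx, pvGetD_nat] at hplea
        rw [pvIdx, pvGetD_nat]
        have hbk := (pvAct_mem hb).2.1
        have hsa := (pvAct_mem ha).2.2
        exact pvPleb_trans m (pvSurv_not_pleb hsa hab hbk) hplea
      have hfc : (pvAct m xs W k).filter ((fun d => !(pvPleb m ((PySem.List.pyGet? xs d).getD 0) (xs.getD k 0))) ∘ pvIdx)
          = (pvAct m xs W k).filter (fun j => !(pvPleb m (xs.getD j 0) (xs.getD k 0))) := by
        apply List.filter_congr
        intro j _
        simp only [Function.comp_apply, pvIdx, pvGetD_nat]
      have hpop : pvPopLoop xs (xs.getD k 0) m h (pre ++ (pvAct m xs W k).map pvIdx)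
          = pre ++ ((pvAct m xs W k).filter (fun j => !(pvPleb m (xs.getD j 0) (xs.getD k 0)))).map pvIdx := by
        rw [← hpre]
        rw [pvPopLoop_spec xs (xs.getD k 0) m pre _ hmono]
        rw [List.filter_map, hfc]
      have hAmid : (List.range' (k - W) (min W k + 1)).filter (pvSurv m xs (k + 1)) =
          (pvAct m xs W k).filter (fun j => !(pvPleb m (xs.getD j 0) (xs.getD k 0))) ++ [k] :=
        pvAct_succ m xs W k
      -- after pop and push
      have hdq2 : pvPopLoop xs (xs.getD k 0) m h dq ++ [pvIdx k] =
          pre ++ ((List.range' (k - W) (min W k + 1)).filter (pvSurv m xs (k + 1))).map pvIdx := by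
        rw [hdq, hpop, hAmid, List.map_append, List.append_assoc]
        rfl
      by_cases hbr : W - 1 ≤ k
      · -- emitting case
        have hbrI : ((W : Int) - 1 ≤ pvIdx k) := by simp only [pvIdx]; omega
        have hminW1 : min W (k + 1) = W := by omega
        have hkA1 : k ∈ pvAct m xs W (k + 1) := by
          rw [pvAct, List.mem_filter]
          exact ⟨List.mem_range'_1.mpr ⟨by omega, by omega⟩, pvSurv_self m xs (k+1) k (by omega)⟩
        obtain ⟨b, brest, hA1⟩ : ∃ b brest, pvAct m xs W (k+1) = b :: brest := by
          rcases hA : pvAct m xs W (k+1) with _ | ⟨b, brest⟩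
          · rw [hA] at hkA1; simp at hkA1
          · exact ⟨b, brest, rfl⟩
        have hbmem : b ∈ pvAct m xs W (k+1) := by rw [hA1]; exact List.mem_cons_self
        have hbbd := pvAct_mem hbmem
        have hval : (PySem.List.pyGet? xs (pvIdx b)).getD 0 = pvSliceExt m xs (k + 1 - W) W := by
          rw [pvIdx, pvGetD_nat]
          exact pvHead_ext m xs W k hW hbr hk b brest hA1
        have hemit : pvEmit m xs W (k+1) = pvEmit m xs W k ++ [pvSliceExt m xs (k + 1 - W) W] := by
          rw [pvEmit, pvEmit]
          have e : k + 1 - (W - 1) = (k - (W - 1)) + 1 := by omega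
          rw [e, List.range_succ, List.map_append]
          have e2 : k - (W - 1) = k + 1 - W := by omega
          rw [e2]
          rfl
        have hsplitA : (List.range' (k - W) (min W k + 1)).filter (pvSurv m xs (k + 1)) = pvAct m xs W (k+1)
            ∨ ((List.range' (k - W) (min W k + 1)).filter (pvSurv m xs (k + 1)) = (k - W) :: pvAct m xs W (k+1) ∧ W ≤ k) := by
          by_cases hkW : W ≤ k
          · rw [List.range'_succ, List.filter_cons]
            have e1 : k - W + 1 = k + 1 - W := by omega
            have e2 : min W k = W := by omega
            have eact : pvAct m xs W (k+1) = (List.range' (k - W + 1) (min W k)).filter (pvSurv m xs (k+1)) := by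
              rw [pvAct, hminW1, e1, e2]
            cases hsv : pvSurv m xs (k+1) (k - W)
            · left; rw [eact]; simp
            · right
              refine ⟨?_, hkW⟩
              rw [eact]
              simp
          · left
            have e1 : k - W = k + 1 - W := by omega
            have e2 : min W k + 1 = min W (k+1) := by omega
            rw [pvAct, e1, e2]
        rcases hsplitA with hAm | ⟨hAm, hkW⟩
        · -- no front eviction
          have hdq2' : pvPopLoop xs (xs.getD k 0) m h dq ++ [pvIdx k] =
              pre ++ (pvIdx b :: brest.map pvIdx) := by
            rw [hdq2, hAm, hA1, List.map_cons]
          have hget : (PySem.List.pyGet? (pre ++ (pvIdx b :: brest.map pvIdx)) ((h : Nat) : Int)).getD 0 = pvIdx b := by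
            rw [← hpre, PySem.List.pyGet?_append_length]
            rfl
          have hnoev : ¬ ((pvIdx b) < pvIdx k - (W : Int) + 1) := by
            have h1 := hbbd.1
            simp only [pvIdx]
            omega
          simp only [pvStep, hv, hdq2']
          rw [if_pos hbrI, hget, if_neg hnoev, hget, hval]
          refine ⟨pre, ?_, hpre, ?_⟩
          · simp only [hA1, List.map_cons]
          · simp only [hres, hemit]
        · -- front eviction
          have hdq2' : pvPopLoop xs (xs.getD k 0) m h dq ++ [pvIdx k] =
              pre ++ (pvIdx (k - W) :: (pvIdx b :: brest.map pvIdx)) := by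
            rw [hdq2, hAm, hA1, List.map_cons, List.map_cons]
          have hget : (PySem.List.pyGet? (pre ++ (pvIdx (k - W) :: (pvIdx b :: brest.map pvIdx))) ((h : Nat) : Int)).getD 0 = pvIdx (k - W) := by
            rw [← hpre, PySem.List.pyGet?_append_length]
            rfl
          have hev : (pvIdx (k - W)) < pvIdx k - (W : Int) + 1 := by
            simp only [pvIdx]
            omega
          have hlen2 : (pre ++ [pvIdx (k - W)]).length = h + 1 := by simp [hpre]
          have hget2 : (PySem.List.pyGet? (pre ++ (pvIdx (k - W) :: (pvIdx b :: brest.map pvIdx))) ((h + 1 : Nat) : Int)).getD 0 = pvIdx b := by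
            have e : pre ++ (pvIdx (k - W) :: (pvIdx b :: brest.map pvIdx)) =
                (pre ++ [pvIdx (k - W)]) ++ (pvIdx b :: brest.map pvIdx) := by simp
            rw [e, ← hlen2, PySem.List.pyGet?_append_length]
            rfl
          simp only [pvStep, hv, hdq2']
          rw [if_pos hbrI, hget, if_pos hev, hget2, hval]
          refine ⟨pre ++ [pvIdx (k - W)], ?_, hlen2, ?_⟩
          · simp only [hA1, List.map_cons, List.append_assoc, List.cons_append, List.nil_append]
          · simp only [hres, hemit]
      · -- not yet emitting
        have hbrI : ¬ ((W : Int) - 1 ≤ pvIdx k) := by simp only [pvIdx]; omega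
        simp only [pvStep, hv, hdq2, if_neg hbrI]
        refine ⟨pre, ?_, hpre, ?_⟩
        · simp only
          congr 2
          rw [pvAct]
          have h1 : k + 1 - W = k - W := by omega
          have h2 : min W (k + 1) = min W k + 1 := by omega
          rw [h1, h2]
        · simp only [hres]
          rw [pvEmit, pvEmit]
          have : k + 1 - (W - 1) = k - (W - 1) := by omega
          rw [this]

theorem pvWindowExt_spec (m : Bool) (xs : List Int) (W C : Nat) (hW : 1 ≤ W) (hC : 1 ≤ C)
    (hlen : C + W - 1 ≤ xs.length) :
    pvWindowExt xs (W : Int) (C : Int) m = (List.range C).map (fun t => pvSliceExt m xs t W) := by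
  have h1 : ((C : Int) + (W : Int) - 1) = ((C + W - 1 : Nat) : Int) := by omega
  rw [pvWindowExt, h1]
  have h2 : PySem.List.pyRange 0 ((C + W - 1 : Nat) : Int) 1 = (List.range (C + W - 1)).map pvIdx := by
    have e : (((C + W - 1 : Nat) : Int) - 0).toNat = C + W - 1 := by omega
    rw [PySem.List.pyRange_one, e]
    apply List.map_congr_left
    intro x _
    simp [pvIdx]
  rw [h2]
  obtain ⟨pre, hdq, hpre, hres⟩ := pvInv_fold m xs W hW (C + W - 1) hlen
  rw [hres, pvEmit]
  have e2 : C + W - 1 - (W - 1) = C := by omega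
  rw [e2]

theorem pvGetD_slice (xs : List Int) (t W r : Nat) (hr : r < W) (hlen : t + W ≤ xs.length) :
    ((xs.drop t).take W).getD r 0 = xs.getD (t + r) 0 := by
  rw [List.getD_eq_getElem?_getD, List.getD_eq_getElem?_getD]
  rw [List.getElem?_eq_getElem (by simp [List.length_take, List.length_drop]; omega),
      List.getElem?_eq_getElem (by omega)]
  rw [List.getElem_take, List.getElem_drop]

theorem pvMax?_value (S : List Int) (e : Int) (he : e ∈ S) (hd : ∀ y ∈ S, y ≤ e) :
    (PySem.List.max? S (fun y => y)).getD 0 = e := by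
  rcases h : PySem.List.max? S (fun y => y) with _ | mm
  · rw [PySem.List.max?_eq_none_iff] at h
    rw [h] at he
    simp at he
  · have hm := PySem.List.max?_mem h
    have hmax := PySem.List.max?_isMax h
    have : mm = e := le_antisymm (hd mm hm) (hmax e he)
    simp [this]

theorem pvMin?_value (S : List Int) (e : Int) (he : e ∈ S) (hd : ∀ y ∈ S, e ≤ y) :
    (PySem.List.min? S (fun y => y)).getD 0 = e := by
  rcases h : PySem.List.min? S (fun y => y) with _ | mm
  · rw [PySem.List.min?_eq_none_iff] at h
    rw [h] at he
    simp at he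
  · have hm := PySem.List.min?_mem h
    have hmin := PySem.List.min?_isMin h
    have : mm = e := le_antisymm (hmin e he) (hd mm hm)
    simp [this]

def pvSub (os cs : List Int) (W : Nat) : List Int :=
  (List.range W).foldl (fun s j => s ++ [os.getD j 0, cs.getD j 0]) []

theorem pvInner (os cs : List Int) (W : Nat) (hos : os.length = W) (hcs : cs.length = W) :
    (List.range W).foldl
      (fun (acc : List Int × List Int × List Int) (j : Nat) =>
        let oj := (PySem.List.pyGet? os (j : Int)).getD 0
        let cj := (PySem.List.pyGet? cs (j : Int)).getD 0
        let ul := if cj < oj then (acc.1 ++ [oj], acc.2.1 ++ [cj])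
                  else (acc.1 ++ [cj], acc.2.1 ++ [oj])
        (ul.1, ul.2, acc.2.2 ++ [oj, cj]))
      ([], [], []) =
    (List.zipWith max os cs, List.zipWith min os cs, pvSub os cs W) := by
  suffices h : ∀ nn ≤ W,
      (List.range nn).foldl
        (fun (acc : List Int × List Int × List Int) (j : Nat) =>
          let oj := (PySem.List.pyGet? os (j : Int)).getD 0
          let cj := (PySem.List.pyGet? cs (j : Int)).getD 0
          let ul := if cj < oj then (acc.1 ++ [oj], acc.2.1 ++ [cj])
                    else (acc.1 ++ [cj], acc.2.1 ++ [oj])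
          (ul.1, ul.2, acc.2.2 ++ [oj, cj]))
        ([], [], []) =
      ((List.zipWith max os cs).take nn, (List.zipWith min os cs).take nn, pvSub os cs nn) by
    have := h W (le_refl _)
    rw [this]
    have hlzW : (List.zipWith max os cs).length = W := by simp [hos, hcs]
    have hlzW' : (List.zipWith min os cs).length = W := by simp [hos, hcs]
    rw [List.take_of_length_le (le_of_eq hlzW), List.take_of_length_le (le_of_eq hlzW')]
  intro nn
  induction nn with
  | zero => intro _; simp [pvSub]
  | succ nn ih =>
      intro hnn
      rw [List.range_succ, List.foldl_append, ih (by omega)]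
      simp only [List.foldl_cons, List.foldl_nil]
      have hoj : (PySem.List.pyGet? os (nn : Int)).getD 0 = os.getD nn 0 := pvGetD_nat os nn
      have hcj : (PySem.List.pyGet? cs (nn : Int)).getD 0 = cs.getD nn 0 := pvGetD_nat cs nn
      rw [hoj, hcj]
      have hlt : nn < W := by omega
      have htU : (List.zipWith max os cs).take (nn+1) =
          (List.zipWith max os cs).take nn ++ [max (os.getD nn 0) (cs.getD nn 0)] := by
        rw [List.take_succ]
        congr 1
        rw [List.getElem?_eq_getElem (by simp [hos, hcs]; omega)]
        simp only [Option.toList_some, List.getElem_zipWith]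
        rw [List.getD_eq_getElem?_getD, List.getD_eq_getElem?_getD,
          List.getElem?_eq_getElem (by omega), List.getElem?_eq_getElem (by omega)]
        rfl
      have htL : (List.zipWith min os cs).take (nn+1) =
          (List.zipWith min os cs).take nn ++ [min (os.getD nn 0) (cs.getD nn 0)] := by
        rw [List.take_succ]
        congr 1
        rw [List.getElem?_eq_getElem (by simp [hos, hcs]; omega)]
        simp only [Option.toList_some, List.getElem_zipWith]
        rw [List.getD_eq_getElem?_getD, List.getD_eq_getElem?_getD,
          List.getElem?_eq_getElem (by omega), List.getElem?_eq_getElem (by omega)]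
        rfl
      have hsub : pvSub os cs (nn+1) = pvSub os cs nn ++ [os.getD nn 0, cs.getD nn 0] := by
        rw [pvSub, pvSub, List.range_succ, List.foldl_append]
        rfl
      rw [htU, htL, hsub]
      by_cases hc : cs.getD nn 0 < os.getD nn 0
      · rw [if_pos hc]
        have h1 : max (os.getD nn 0) (cs.getD nn 0) = os.getD nn 0 := by omega
        have h2 : min (os.getD nn 0) (cs.getD nn 0) = cs.getD nn 0 := by omega
        rw [h1, h2]
      · rw [if_neg hc]
        have h1 : max (os.getD nn 0) (cs.getD nn 0) = cs.getD nn 0 := by omega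
        have h2 : min (os.getD nn 0) (cs.getD nn 0) = os.getD nn 0 := by omega
        rw [h1, h2]

theorem pvSub_perm (os cs : List Int) (W : Nat) (hos : os.length = W) (hcs : cs.length = W) :
    (pvSub os cs W).Perm (List.zipWith max os cs ++ List.zipWith min os cs) := by
  suffices h : ∀ nn ≤ W,
      (pvSub os cs nn).Perm ((List.zipWith max os cs).take nn ++ (List.zipWith min os cs).take nn) by
    have := h W (le_refl _)
    have hlzW : (List.zipWith max os cs).length = W := by simp [hos, hcs]
    have hlzW' : (List.zipWith min os cs).length = W := by simp [hos, hcs]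
    rwa [List.take_of_length_le (le_of_eq hlzW), List.take_of_length_le (le_of_eq hlzW')] at this
  intro nn
  induction nn with
  | zero => intro _; simp [pvSub]
  | succ nn ih =>
      intro hnn
      have hlt : nn < W := by omega
      have hsub : pvSub os cs (nn+1) = pvSub os cs nn ++ [os.getD nn 0, cs.getD nn 0] := by
        rw [pvSub, pvSub, List.range_succ, List.foldl_append]
        rfl
      rw [hsub]
      rw [List.perm_iff_count]
      intro z
      have hcnt := List.Perm.count_eq (ih (by omega)) z
      have htU : (List.zipWith max os cs).take (nn+1) =
          (List.zipWith max os cs).take nn ++ [(List.zipWith max os cs).getD nn 0] := by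
        rw [List.take_succ, List.getElem?_eq_getElem (by simp [hos, hcs]; omega)]
        rw [List.getD_eq_getElem?_getD, List.getElem?_eq_getElem (by simp [hos, hcs]; omega)]
        rfl
      have htL : (List.zipWith min os cs).take (nn+1) =
          (List.zipWith min os cs).take nn ++ [(List.zipWith min os cs).getD nn 0] := by
        rw [List.take_succ, List.getElem?_eq_getElem (by simp [hos, hcs]; omega)]
        rw [List.getD_eq_getElem?_getD, List.getElem?_eq_getElem (by simp [hos, hcs]; omega)]
        rfl
      have hUv : (List.zipWith max os cs).getD nn 0 = max (os.getD nn 0) (cs.getD nn 0) := by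
        rw [List.getD_eq_getElem?_getD, List.getElem?_eq_getElem (by simp [hos, hcs]; omega)]
        simp only [Option.getD_some, List.getElem_zipWith]
        rw [List.getD_eq_getElem?_getD, List.getD_eq_getElem?_getD,
          List.getElem?_eq_getElem (by omega), List.getElem?_eq_getElem (by omega)]
        rfl
      have hLv : (List.zipWith min os cs).getD nn 0 = min (os.getD nn 0) (cs.getD nn 0) := by
        rw [List.getD_eq_getElem?_getD, List.getElem?_eq_getElem (by simp [hos, hcs]; omega)]
        simp only [Option.getD_some, List.getElem_zipWith]
        rw [List.getD_eq_getElem?_getD, List.getD_eq_getElem?_getD,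
          List.getElem?_eq_getElem (by omega), List.getElem?_eq_getElem (by omega)]
        rfl
      rw [htU, htL, hUv, hLv]
      simp only [List.count_append, List.count_cons, List.count_nil]
      rw [hcnt]
      simp only [List.count_append]
      rcases le_total (os.getD nn 0) (cs.getD nn 0) with hmc | hmc
      · rw [max_eq_right hmc, min_eq_left hmc]
        omega
      · rw [max_eq_left hmc, min_eq_right hmc]
        omega

def pvEnt (hi lo : List Int) (window mid : Int) (W midN : Nat) (t : Nat) : List (List Int) :=
  if hi.getD (t + midN) 0 = pvSliceExt true hi t W then [[(t : Int) + window - mid - 1, hi.getD (t + midN) 0]]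
  else if lo.getD (t + midN) 0 = pvSliceExt false lo t W then [[(t : Int) + window - mid - 1, lo.getD (t + midN) 0]]
  else []

def pvSpecOut (hi lo : List Int) (window mid : Int) (W midN C : Nat) : List (List Int) :=
  (List.range C).foldl (fun acc t => acc ++ pvEnt hi lo window mid W midN t) []

theorem pvPyRange0 (C : Nat) : PySem.List.pyRange 0 (C : Int) 1 = (List.range C).map pvIdx := by
  have e : (((C : Nat) : Int) - 0).toNat = C := by omega
  rw [PySem.List.pyRange_one, e]
  apply List.map_congr_left
  intro x _
  simp [pvIdx]

theorem pvFloordiv2 (window : Int) (W : Nat) (hwW : window = (W : Int)) :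
    PySem.Int.floordiv window 2 = ((W / 2 : Nat) : Int) := by
  rw [hwW]
  have h2 : (2 : Int) = ((2 : Nat) : Int) := rfl
  rw [h2, PySem.Int.floordiv_natCast]

-- zipWith max/min over the slices is the slice of hi/lo
theorem pvZip_slice (f : Int → Int → Int) (opens closes : List Int) (t W : Nat)
    (hlen : t + W ≤ (min opens.length closes.length)) :
    List.zipWith f ((opens.drop t).take W) ((closes.drop t).take W) =
      ((((List.zip opens closes).map (fun p => f p.1 p.2)).drop t).take W) := by
  apply List.ext_getElem
  · simp; omega
  · intro r h1 h2
    have hr : r < W := by simp at h1; omega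
    have hrt : t + r < min opens.length closes.length := by omega
    rw [List.getElem_zipWith, List.getElem_take, List.getElem_drop,
        List.getElem_take, List.getElem_drop, List.getElem_take, List.getElem_drop,
        List.getElem_map, List.getElem_zip]

theorem pvHi_len (opens closes : List Int) (f : Int → Int → Int) :
    ((List.zip opens closes).map (fun p => f p.1 p.2)).length = min opens.length closes.length := by
  simp

-- the value A's max(subset) computes
theorem pvMaxSubset (opens closes : List Int) (t W : Nat) (hW : 1 ≤ W)
    (hlen : t + W ≤ min opens.length closes.length) :
    (PySem.List.max? (pvSub ((opens.drop t).take W) ((closes.drop t).take W) W) (fun y => y)).getD 0 =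
      pvSliceExt true ((List.zip opens closes).map (fun p => max p.1 p.2)) t W := by
  set hi := (List.zip opens closes).map (fun p => max p.1 p.2) with hhi
  set os := (opens.drop t).take W with hos
  set cs := (closes.drop t).take W with hcs
  have hlos : os.length = W := by rw [hos]; simp; omega
  have hlcs : cs.length = W := by rw [hcs]; simp; omega
  have hhilen : t + W ≤ hi.length := by rw [hhi, pvHi_len]; omega
  have hU : List.zipWith max os cs = (hi.drop t).take W := pvZip_slice max opens closes t W hlen
  obtain ⟨hemem, hedom⟩ := pvSliceExt_ext true hi t W hW hhilen
  have hperm := pvSub_perm os cs W hlos hlcs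
  apply pvMax?_value
  · rw [hperm.mem_iff, ← hU] at *
    exact List.mem_append_left _ (by rw [hU]; exact hemem)
  · intro y hy
    rw [hperm.mem_iff] at hy
    rcases List.mem_append.mp hy with hy | hy
    · have := hedom y (by rw [← hU]; exact hy)
      simpa [pvPleb] using this
    · obtain ⟨r, hr, hget⟩ := List.mem_iff_getElem.mp hy
      have hrW : r < W := by simpa [hlos, hlcs] using hr
      have hz : (List.zipWith max os cs)[r]'(by simp [hlos, hlcs]; omega) ∈ List.zipWith max os cs :=
        List.getElem_mem _
      have hyz : y ≤ (List.zipWith max os cs)[r]'(by simp [hlos, hlcs]; omega) := by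
        rw [← hget, List.getElem_zipWith, List.getElem_zipWith]
        exact min_le_max
      have := hedom _ (by rw [← hU]; exact hz)
      simp only [pvPleb, if_pos, decide_eq_true_eq] at this
      omega

theorem pvMinSubset (opens closes : List Int) (t W : Nat) (hW : 1 ≤ W)
    (hlen : t + W ≤ min opens.length closes.length) :
    (PySem.List.min? (pvSub ((opens.drop t).take W) ((closes.drop t).take W) W) (fun y => y)).getD 0 =
      pvSliceExt false ((List.zip opens closes).map (fun p => min p.1 p.2)) t W := by
  set lo := (List.zip opens closes).map (fun p => min p.1 p.2) with hlo
  set os := (opens.drop t).take W with hos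
  set cs := (closes.drop t).take W with hcs
  have hlos : os.length = W := by rw [hos]; simp; omega
  have hlcs : cs.length = W := by rw [hcs]; simp; omega
  have hlolen : t + W ≤ lo.length := by rw [hlo, pvHi_len]; omega
  have hL : List.zipWith min os cs = (lo.drop t).take W := pvZip_slice min opens closes t W hlen
  obtain ⟨hemem, hedom⟩ := pvSliceExt_ext false lo t W hW hlolen
  have hperm := pvSub_perm os cs W hlos hlcs
  apply pvMin?_value
  · rw [hperm.mem_iff]
    exact List.mem_append_right _ (by rw [hL]; exact hemem)
  · intro y hy
    rw [hperm.mem_iff] at hy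
    rcases List.mem_append.mp hy with hy | hy
    · obtain ⟨r, hr, hget⟩ := List.mem_iff_getElem.mp hy
      have hrW : r < W := by simpa [hlos, hlcs] using hr
      have hro : r < os.length := by omega
      have hrc : r < cs.length := by omega
      have hb : r < (List.zipWith min os cs).length := by simp [hlos, hlcs]; omega
      have hzeq : (List.zipWith min os cs)[r]'hb = min (os[r]'hro) (cs[r]'hrc) :=
        List.getElem_zipWith
      have hz : min (os[r]'hro) (cs[r]'hrc) ∈ List.zipWith min os cs := by
        rw [← hzeq]
        exact List.getElem_mem _
      have hyz : min (os[r]'hro) (cs[r]'hrc) ≤ y := by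
        rw [← hget, List.getElem_zipWith]
        exact min_le_max
      have := hedom _ (by rw [← hL]; exact hz)
      simp [pvPleb] at this
      omega
    · have := hedom y (by rw [← hL]; exact hy)
      simpa [pvPleb] using this

theorem pvGetD_map_range (f : Nat → Int) (C t : Nat) (h : t < C) :
    (PySem.List.pyGet? ((List.range C).map f) ((t : Nat) : Int)).getD 0 = f t := by
  rw [PySem.List.pyGet?_natCast, List.getElem?_map, List.getElem?_range h]
  rfl

theorem pvB_spec (opens closes : List Int) (window : Int) (W C : Nat)
    (hwW : window = (W : Int)) (hW : 1 ≤ W)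
    (hC : ((opens.length : Int) - 1 - window) = (C : Int)) (hC1 : 1 ≤ C)
    (hlc : opens.length ≤ closes.length + 2) :
    find_turningpoints_alt opens closes window =
      pvSpecOut ((List.zip opens closes).map (fun p => max p.1 p.2))
        ((List.zip opens closes).map (fun p => min p.1 p.2)) window
        (PySem.Int.floordiv window 2) W (W / 2) C := by
  have hn : opens.length = W + 1 + C := by omega
  have hlen : C + W - 1 ≤ min opens.length closes.length := by omega
  simp only [find_turningpoints_alt]
  rw [if_neg (by omega)]
  rw [hC, hwW, pvFloordiv2 (W : Int) W rfl]
  rw [pvWindowExt_spec true _ W C hW hC1 (by simpa using hlen),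
      pvWindowExt_spec false _ W C hW hC1 (by simpa using hlen)]
  rw [pvPyRange0 C, List.foldl_map]
  rw [pvSpecOut]
  apply PySem.List.foldl_congr_mem
  intro acc t hmem
  have ht : t < C := List.mem_range.mp hmem
  simp only [pvIdx]
  have e1 : ((t : Nat) : Int) + ((W / 2 : Nat) : Int) = (((t + W / 2 : Nat)) : Int) := by
    push_cast
    ring
  rw [e1, pvGetD_nat ((List.zip opens closes).map (fun p => max p.1 p.2)) (t + W / 2),
      pvGetD_nat ((List.zip opens closes).map (fun p => min p.1 p.2)) (t + W / 2),
      pvGetD_map_range _ C t ht, pvGetD_map_range _ C t ht]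
  rw [pvEnt]
  split_ifs with h1 h2 <;> simp

theorem pvA_spec (opens closes : List Int) (window : Int) (W C : Nat)
    (hwW : window = (W : Int)) (hW : 1 ≤ W)
    (hC : ((opens.length : Int) - 1 - window) = (C : Int)) (hC1 : 1 ≤ C)
    (hlc : opens.length ≤ closes.length + 2) :
    find_turningpoints opens closes window =
      pvSpecOut ((List.zip opens closes).map (fun p => max p.1 p.2))
        ((List.zip opens closes).map (fun p => min p.1 p.2)) window
        (PySem.Int.floordiv window 2) W (W / 2) C := by
  have hn : opens.length = W + 1 + C := by omega
  rw [find_turningpoints]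
  rw [hwW, pvFloordiv2 (W : Int) W rfl]
  have hrange : PySem.List.pyRange (W : Int) ((opens.length : Int) - 1) 1 =
      (List.range C).map (fun (tt : Nat) => (W : Int) + (tt : Int)) := by
    rw [PySem.List.pyRange_one]
    have e : (((opens.length : Int) - 1) - (W : Int)).toNat = C := by omega
    rw [e]
  rw [hrange, List.foldl_map]
  rw [pvSpecOut]
  apply PySem.List.foldl_congr_mem
  intro acc t hmem
  have ht : t < C := List.mem_range.mp hmem
  have hmidlt : W / 2 < W := Nat.div_lt_self (by omega) (by omega)
  have htW : t + W ≤ min opens.length closes.length := by omega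
  have e1 : (W : Int) + (t : Int) - (W : Int) = ((t : Nat) : Int) := by ring
  have e2 : (W : Int) + (t : Int) = ((t : Nat) : Int) + ((W : Nat) : Int) := by ring
  rw [e1, e2, PySem.List.slice_natCast_add, PySem.List.slice_natCast_add]
  dsimp only
  have hlos : ((opens.drop t).take W).length = W := by simp; omega
  have hlcs : ((closes.drop t).take W).length = W := by simp; omega
  rw [hlcs, pvInner _ _ W hlos hlcs]
  simp only
  rw [pvGetD_nat, pvGetD_nat]
  have hU : List.zipWith max ((opens.drop t).take W) ((closes.drop t).take W) =
      ((((List.zip opens closes).map (fun p => max p.1 p.2)).drop t).take W) :=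
    pvZip_slice max opens closes t W htW
  have hL : List.zipWith min ((opens.drop t).take W) ((closes.drop t).take W) =
      ((((List.zip opens closes).map (fun p => min p.1 p.2)).drop t).take W) :=
    pvZip_slice min opens closes t W htW
  have hUg : (List.zipWith max ((opens.drop t).take W) ((closes.drop t).take W)).getD (W / 2) 0 =
      ((List.zip opens closes).map (fun p => max p.1 p.2)).getD (t + W / 2) 0 := by
    rw [hU]
    exact pvGetD_slice _ t W (W / 2) hmidlt (by rw [pvHi_len]; omega)
  have hLg : (List.zipWith min ((opens.drop t).take W) ((closes.drop t).take W)).getD (W / 2) 0 =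
      ((List.zip opens closes).map (fun p => min p.1 p.2)).getD (t + W / 2) 0 := by
    rw [hL]
    exact pvGetD_slice _ t W (W / 2) hmidlt (by rw [pvHi_len]; omega)
  rw [hUg, hLg, pvMaxSubset opens closes t W hW htW, pvMinSubset opens closes t W hW htW]
  rw [pvEnt]
  split_ifs with h1 h2 <;> simp


theorem pvMain (opens closes : List Int) (window : Int)
    (hpre : Pre_find_turningpoints opens closes window) :
    find_turningpoints opens closes window = find_turningpoints_alt opens closes window := by
  rw [Pre_find_turningpoints] at hpre
  by_cases hcnt : (opens.length : Int) - 1 - window ≤ 0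
  · rw [find_turningpoints, find_turningpoints_alt]
    rw [PySem.List.pyRange_one_eq_nil (by omega)]
    simp only [List.foldl_nil]
    rw [if_pos (by omega)]
  · have hw1 : 1 ≤ window ∧ (opens.length : Int) ≤ (closes.length : Int) + 2 := by
      rcases hpre with h | h
      · exact h
      · omega
    have hwW : window = ((window.toNat : Nat) : Int) := by omega
    have hW : 1 ≤ window.toNat := by omega
    have hC : ((opens.length : Int) - 1 - window) = ((((opens.length : Int) - 1 - window).toNat : Nat) : Int) := by omega
    have hC1 : 1 ≤ ((opens.length : Int) - 1 - window).toNat := by omega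
    have hlc : opens.length ≤ closes.length + 2 := by omega
    rw [pvA_spec opens closes window window.toNat (((opens.length : Int) - 1 - window).toNat) hwW hW hC hC1 hlc,
        pvB_spec opens closes window window.toNat (((opens.length : Int) - 1 - window).toNat) hwW hW hC hC1 hlc]

-- ===== VERDICT (by name: the statement is the Claim_ definition above) =====
theorem find_turningpoints_spec : Claim_equal_find_turningpoints := by
  intro opens closes window _ hpre
  unfold Spec_find_turningpoints
  exact pvMain opens closes window hpre
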